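-- pv_equiv track=rewrite | github.com/Develata/Deve-Skills | My-Skills/code-shorters/md-shorter/scripts/md_modularizer.py | split_by_heading
-- ===== SOURCE A (Python) =====
-- def split_by_heading(lines):
--     sections = []
--     current = []
--     for line in lines:
--         if line.startswith("## ") and current:
--             sections.append(current)
--             current = []
--         current.append(line)
--     if current:
--         sections.append(current)
--     return sections
-- ===== SOURCE B (Python) =====
-- def split_by_heading(lines):
--     # Two-pointer scan: each section is the slice from one boundary to the next.
--     sections = []
--     n = len(lines)
--     i = 0
--     while i < n:
--         j = i + 1
--         while j < n and not lines[j].startswith("## "):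
--             j += 1
--         sections.append(lines[i:j])
--         i = j
--     return sections
-- ===== Notes on version B (the rewrite author's own statement) =====
-- stated objective: alternative
-- what changed: Replaced the buffer-accumulation pass (flush current list at each heading) by a two-pointer scan that finds the next H2 boundary and emits each section as one slice lines[i:j].
import Mathlib
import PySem

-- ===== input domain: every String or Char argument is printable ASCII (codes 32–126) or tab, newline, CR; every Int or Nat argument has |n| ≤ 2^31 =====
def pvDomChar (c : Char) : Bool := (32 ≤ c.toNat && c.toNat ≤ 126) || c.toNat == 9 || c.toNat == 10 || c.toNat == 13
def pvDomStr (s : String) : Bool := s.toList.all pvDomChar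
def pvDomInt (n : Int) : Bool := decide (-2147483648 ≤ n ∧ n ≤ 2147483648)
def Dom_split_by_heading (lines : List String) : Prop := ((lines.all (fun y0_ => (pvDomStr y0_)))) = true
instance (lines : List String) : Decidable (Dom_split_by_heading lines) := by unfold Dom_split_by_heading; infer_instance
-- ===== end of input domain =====

-- B replaces A's buffer-accumulation pass by a two-pointer scan slicing each section out directly (alternative decomposition, same cost).


-- ===== PORT A =====
-- one loop iteration: flush `current` into `sections` at a heading, then append the line
def pvStepA (p : List (List String) × List String) (line : String) : List (List String) × List String :=
  let q := if PySem.Str.startswith line "## " && !p.2.isEmpty then (p.1 ++ [p.2], ([] : List String)) else p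
  (q.1, q.2 ++ [line])

-- the trailing `if current: sections.append(current)`
def pvFinA (st : List (List String) × List String) : List (List String) :=
  if !st.2.isEmpty then st.1 ++ [st.2] else st.1

def split_by_heading (lines : List String) : List (List String) :=
  pvFinA (lines.foldl pvStepA (([], []) : List (List String) × List String))

-- ===== PORT B =====
-- `not line.startswith("## ")`: the line does not open a new section
def pvP (s : String) : Bool := !(PySem.Str.startswith s "## ")

-- inner while: advance j while j < n and lines[j] is not a heading (lines[j] in range by the guard)
def pvFindEnd (lines : List String) (j : Nat) : Nat :=
  if h : j < lines.length then
    if pvP lines[j] then pvFindEnd lines (j + 1) else j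
  else j
termination_by lines.length - j

theorem pvFindEnd_ge (lines : List String) (j : Nat) : j ≤ pvFindEnd lines j := by
  unfold pvFindEnd
  split
  · split
    · exact le_trans (Nat.le_succ j) (pvFindEnd_ge lines (j + 1))
    · exact le_refl j
  · exact le_refl j
termination_by lines.length - j

-- outer while: emit the slice lines[i:j] (= (drop i).take (j-i) for these natural bounds, PySem.List.slice_natCast) and continue at j
def pvOuter (lines : List String) (i : Nat) (sections : List (List String)) : List (List String) :=
  if i < lines.length then
    let j := pvFindEnd lines (i + 1)
    pvOuter lines j (sections ++ [(lines.drop i).take (j - i)])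
  else sections
termination_by lines.length - i
decreasing_by
  have := pvFindEnd_ge lines (i + 1)
  omega

def split_by_heading_alt (lines : List String) : List (List String) :=
  pvOuter lines 0 []

-- ===== PRECONDITION & SPEC =====
def Spec_split_by_heading (lines : List String) (out : List (List String)) : Prop := out = split_by_heading_alt lines
instance (lines : List String) (out : List (List String)) : Decidable (Spec_split_by_heading lines out) := by unfold Spec_split_by_heading; infer_instance

-- ===== CLAIM (what is proved, stated in full; the proofs are below) =====
def Claim_equal_split_by_heading : Prop := ∀ (lines : List String), Dom_split_by_heading lines → Spec_split_by_heading lines (split_by_heading lines)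

-- ===== LEMMAS AND PROOFS =====

-- common characterization: a section is its head line plus the following run of non-heading lines
def pvGo (l : List String) : List (List String) :=
  match l with
  | [] => []
  | x :: xs => (x :: xs.takeWhile pvP) :: pvGo (xs.dropWhile pvP)
termination_by l.length
decreasing_by
  simp only [List.length_cons]
  exact Nat.lt_succ_of_le (List.length_dropWhile_le _ _)

theorem pvTakeLen {α : Type} (p : α → Bool) (l : List α) :
    l.take (l.takeWhile p).length = l.takeWhile p := by
  have h := List.take_left (l₁ := l.takeWhile p) (l₂ := l.dropWhile p)
  rwa [List.takeWhile_append_dropWhile] at h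

theorem pvDropLen {α : Type} (p : α → Bool) (l : List α) :
    l.drop (l.takeWhile p).length = l.dropWhile p := by
  have h := List.drop_left (l₁ := l.takeWhile p) (l₂ := l.dropWhile p)
  rwa [List.takeWhile_append_dropWhile] at h

theorem pvFindEnd_eq (lines : List String) (j : Nat) :
    pvFindEnd lines j = j + ((lines.drop j).takeWhile pvP).length := by
  by_cases h : j < lines.length
  · rw [pvFindEnd, dif_pos h]
    have hd : lines.drop j = lines[j] :: lines.drop (j + 1) := (List.getElem_cons_drop h).symm
    rw [hd, List.takeWhile_cons]
    by_cases hp : pvP lines[j] = true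
    · rw [if_pos hp, hp, if_pos rfl, pvFindEnd_eq lines (j + 1)]
      simp only [List.length_cons]
      omega
    · have hf : pvP lines[j] = false := by simpa using hp
      rw [if_neg hp, hf]
      simp
  · rw [pvFindEnd, dif_neg h, List.drop_eq_nil_of_le (by omega)]
    simp
termination_by lines.length - j

theorem pvOuter_eq (lines : List String) (i : Nat) (secs : List (List String)) :
    pvOuter lines i secs = secs ++ pvGo (lines.drop i) := by
  rw [pvOuter]
  by_cases h : i < lines.length
  · rw [if_pos h]
    have hd : lines.drop i = lines[i] :: lines.drop (i + 1) := (List.getElem_cons_drop h).symm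
    have hj := pvFindEnd_eq lines (i + 1)
    have hslice : (lines.drop i).take (pvFindEnd lines (i + 1) - i)
        = lines[i] :: (lines.drop (i + 1)).takeWhile pvP := by
      rw [hd, hj, show i + 1 + ((lines.drop (i+1)).takeWhile pvP).length - i
            = ((lines.drop (i+1)).takeWhile pvP).length + 1 by omega]
      rw [List.take_succ_cons, pvTakeLen]
    have hdropj : lines.drop (pvFindEnd lines (i + 1)) = (lines.drop (i + 1)).dropWhile pvP := by
      rw [hj, ← List.drop_drop, pvDropLen]
    rw [pvOuter_eq lines (pvFindEnd lines (i + 1)) _, hdropj, hslice, hd, pvGo]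
    simp
  · rw [if_neg h, List.drop_eq_nil_of_le (by omega), pvGo]
    simp
termination_by lines.length - i
decreasing_by
  have := pvFindEnd_ge lines (i + 1)
  omega

-- A's fold invariant: with a nonempty buffer, finishing the fold extends the buffer by the
-- run of non-heading lines and continues section-wise on the rest
theorem pvFoldA (rest : List String) (secs : List (List String)) (cur : List String) (hc : cur ≠ []) :
    pvFinA (rest.foldl pvStepA (secs, cur))
      = secs ++ (cur ++ rest.takeWhile pvP) :: pvGo (rest.dropWhile pvP) := by
  induction rest generalizing secs cur with
  | nil => simp [pvFinA, hc, pvGo]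
  | cons l rest ih =>
      rw [List.foldl_cons, List.takeWhile_cons, List.dropWhile_cons]
      by_cases hsw : PySem.Chars.startswith l.toList ['#', '#', ' '] = true
      · have hpf : pvP l = false := by simp [pvP, hsw]
        have hstep : pvStepA (secs, cur) l = (secs ++ [cur], [l]) := by
          simp [pvStepA, hsw, hc]
        rw [hstep, ih (secs ++ [cur]) [l] (by simp), hpf]
        simp only [Bool.false_eq_true, if_false]
        rw [pvGo]
        simp
      · have hpt : pvP l = true := by simp [pvP, hsw]
        have hstep : pvStepA (secs, cur) l = (secs, cur ++ [l]) := by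
          simp [pvStepA, hsw]
        rw [hstep, ih secs (cur ++ [l]) (by simp), hpt]
        simp

theorem splitA_eq_go (lines : List String) : split_by_heading lines = pvGo lines := by
  cases lines with
  | nil => simp [split_by_heading, pvFinA, pvGo]
  | cons x xs =>
      rw [split_by_heading, List.foldl_cons]
      have hstep : pvStepA ([], []) x = ([], [x]) := by simp [pvStepA]
      rw [hstep, pvFoldA xs [] [x] (by simp), pvGo]
      simp

-- ===== VERDICT (by name: the statement is the Claim_ definition above) =====
theorem split_by_heading_spec : Claim_equal_split_by_heading := by
  intro lines _
  unfold Spec_split_by_heading split_by_heading_alt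
  rw [pvOuter_eq, splitA_eq_go]
  simp
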